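-- pv_equiv track=rewrite | github.com/GDeLaurentis/lips | lips/invariants.py | CheckIfNeighbouring
-- ===== SOURCE A (Python) =====
-- def CheckIfNeighbouring(n, middle):
--     a = middle[0]
--     near = [a, a - 1, a + 1]
--     if a == n:
--         near += [1]
--     if a == 1:
--         near += [n]
--     for j in range(len(middle)):
--         for i in range(len(middle)):
--             if middle[i] in near:
--                 near += [middle[i] + 1, middle[i] - 1]
--                 if middle[i] == n:
--                     near += [1]
--                 if middle[i] == 1:
--                     near += [n]
--     if all(entry in near for entry in middle):
--         return True
--     else:
--         return False
-- ===== SOURCE B (Python) =====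
-- def CheckIfNeighbouring(n, middle):
--     """BFS over the set of distinct indices instead of quadratic passes over a growing list."""
--     def nbrs(x):
--         out = {x - 1, x + 1}
--         if x == n:
--             out.add(1)
--         if x == 1:
--             out.add(n)
--         return out
--     elems = set(middle)
--     seen = {middle[0]}
--     frontier = seen
--     while frontier:
--         frontier = {x for x in elems
--                     if x not in seen and not seen.isdisjoint(nbrs(x))}
--         seen |= frontier
--     return elems <= seen
-- ===== Notes on version B (the rewrite author's own statement) =====
-- stated objective: faster
-- what changed: Replaces A's m*m passes that append neighbour values to an ever-growing list (with linear membership scans over it) by a BFS fixpoint on the set of distinct indices: grow a 'seen' set by a frontier of elements adjacent to it until the frontier is empty, then test set inclusion.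
import Mathlib
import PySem

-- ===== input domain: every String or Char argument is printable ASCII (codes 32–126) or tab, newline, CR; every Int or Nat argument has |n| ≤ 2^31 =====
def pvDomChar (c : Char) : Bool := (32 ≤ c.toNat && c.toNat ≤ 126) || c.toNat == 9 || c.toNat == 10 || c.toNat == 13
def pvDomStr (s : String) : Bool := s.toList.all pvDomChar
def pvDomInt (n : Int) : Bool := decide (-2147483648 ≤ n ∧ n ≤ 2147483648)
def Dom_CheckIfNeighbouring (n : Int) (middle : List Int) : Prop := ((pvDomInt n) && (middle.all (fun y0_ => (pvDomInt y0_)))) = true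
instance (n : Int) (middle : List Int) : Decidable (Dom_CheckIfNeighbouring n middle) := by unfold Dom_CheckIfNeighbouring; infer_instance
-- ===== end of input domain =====

-- B replaces A's quadratic list-growing passes by a BFS fixpoint on the set of distinct
-- indices (measured much faster); the equivalence is proved for every non-empty `middle`.

-- ===== PORT A =====
-- one inner-loop body: if middle[i] in near: near += [middle[i]+1, middle[i]-1] (+ wraps)
def nearStep (n : Int) (near : List Int) (x : Int) : List Int :=
  if near.contains x then
    let near1 := near ++ [x + 1, x - 1]
    let near2 := if x = n then near1 ++ [1] else near1
    if x = 1 then near2 ++ [n] else near2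
  else near

def CheckIfNeighbouring (n : Int) (middle : List Int) : Bool :=
  match middle with
  | [] => false   -- Python raises IndexError on middle[0]; excluded by Pre_
  | a :: _ =>
    let near0 := [a, a - 1, a + 1]
    let near1 := if a = n then near0 ++ [1] else near0
    let near2 := if a = 1 then near1 ++ [n] else near1
    let nearF := (List.range middle.length).foldl
      (fun nr _ => middle.foldl (nearStep n) nr) near2
    middle.all (fun entry => nearF.contains entry)

-- ===== PORT B =====
-- nbrs(x) = {x-1, x+1} (+ wraps), a Python set
def nbrsB (n x : Int) : PySem.Set Int :=
  let out := PySem.Set.ofList [x - 1, x + 1]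
  let out1 := if x = n then PySem.Set.add out 1 else out
  if x = 1 then PySem.Set.add out1 n else out1

-- termination helper for the while-loop: adding a nonempty frontier shrinks the unseen part
theorem pv_filter_le {α : Type} (l : List α) (p q : α → Bool)
    (himp : ∀ x, q x = true → p x = true) :
    (l.filter q).length ≤ (l.filter p).length := by
  induction l with
  | nil => simp
  | cons z l ih =>
    simp only [List.filter_cons]
    by_cases hq : q z = true
    · rw [if_pos hq, if_pos (himp z hq)]
      simp only [List.length_cons]
      exact Nat.succ_le_succ ih
    · rw [if_neg hq]
      split
      · simp only [List.length_cons]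
        exact Nat.le_succ_of_le ih
      · exact ih

theorem pv_filter_lt {α : Type} (l : List α) (p q : α → Bool)
    (himp : ∀ x, q x = true → p x = true)
    (e : α) (he : e ∈ l) (hpe : p e = true) (hqe : q e = false) :
    (l.filter q).length < (l.filter p).length := by
  induction l with
  | nil => simp at he
  | cons z l ih =>
    simp only [List.filter_cons]
    rcases List.mem_cons.mp he with rfl | he'
    · rw [if_neg (by simp [hqe]), if_pos hpe]
      simp only [List.length_cons]
      exact Nat.lt_succ_of_le (pv_filter_le l p q himp)
    · by_cases hq : q z = true
      · rw [if_pos hq, if_pos (himp z hq)]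
        simp only [List.length_cons]
        exact Nat.succ_lt_succ (ih he')
      · rw [if_neg hq]
        split
        · exact Nat.lt_succ_of_lt (ih he')
        · exact ih he'

-- while frontier: frontier = {x in elems : x not in seen and nbrs(x) meets seen}; seen |= frontier
def bfsFrontier (n : Int) (elems seen : PySem.Set Int) : PySem.Set Int :=
  elems.filter
    (fun x => !(PySem.Set.contains seen x) && !(PySem.Set.isdisjoint seen (nbrsB n x)))

def bfsB (n : Int) (elems seen : PySem.Set Int) : PySem.Set Int :=
  if h : bfsFrontier n elems seen = [] then seen
  else bfsB n elems (PySem.Set.union seen (bfsFrontier n elems seen))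
termination_by (elems.filter (fun x => !(PySem.Set.contains seen x))).length
decreasing_by
  rcases List.exists_mem_of_ne_nil _ h with ⟨e, hef⟩
  obtain ⟨heel, hepred⟩ := List.mem_filter.mp hef
  have himp : ∀ x : Int,
      (!(PySem.Set.contains (PySem.Set.union seen (bfsFrontier n elems seen)) x)) = true →
      (!(PySem.Set.contains seen x)) = true := by
    intro x hx
    simp only [Bool.not_eq_true'] at hx ⊢
    rw [← Bool.not_eq_true, PySem.Set.contains_iff] at hx ⊢
    intro hmem
    exact hx ((PySem.Set.mem_union _ _ _).mpr (Or.inl hmem))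
  have hpe : (!(PySem.Set.contains seen e)) = true := by
    have h2 : ((!(PySem.Set.contains seen e)) &&
        (!(PySem.Set.isdisjoint seen (nbrsB n e)))) = true := hepred
    exact (Bool.and_eq_true _ _ |>.mp h2).1
  have hqe :
      (!(PySem.Set.contains (PySem.Set.union seen (bfsFrontier n elems seen)) e)) = false := by
    have hm : PySem.Set.contains (PySem.Set.union seen (bfsFrontier n elems seen)) e = true :=
      (PySem.Set.contains_iff _ _).mpr ((PySem.Set.mem_union _ _ _).mpr (Or.inr hef))
    simp [hm]
    exact fun _ => hef
  exact pv_filter_lt elems _ _ himp e heel hpe hqe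

def CheckIfNeighbouring_alt (n : Int) (middle : List Int) : Bool :=
  match middle with
  | [] => false   -- Python raises IndexError on middle[0]; excluded by Pre_
  | a :: _ =>
    let elems := PySem.Set.ofList middle
    let seen := PySem.Set.ofList [a]
    let r := bfsB n elems seen
    PySem.Set.issubset elems r

-- ===== PRECONDITION & SPEC =====
-- Pre_ excludes only the empty list, on which A raises IndexError (middle[0]).
def Pre_CheckIfNeighbouring (n : Int) (middle : List Int) : Prop := middle ≠ []
instance (n : Int) (middle : List Int) : Decidable (Pre_CheckIfNeighbouring n middle) := by
  unfold Pre_CheckIfNeighbouring; infer_instance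

def pvWitness_CheckIfNeighbouring : Int × List Int := (4, [2, 3, 1])

def Spec_CheckIfNeighbouring (n : Int) (middle : List Int) (out : Bool) : Prop := out = CheckIfNeighbouring_alt n middle
instance (n : Int) (middle : List Int) (out : Bool) : Decidable (Spec_CheckIfNeighbouring n middle out) := by unfold Spec_CheckIfNeighbouring; infer_instance

-- ===== CLAIM (what is proved, stated in full; the proofs are below) =====
def Claim_equal_CheckIfNeighbouring : Prop := ∀ (n : Int) (middle : List Int), Dom_CheckIfNeighbouring n middle → Pre_CheckIfNeighbouring n middle → Spec_CheckIfNeighbouring n middle (CheckIfNeighbouring n middle)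

-- ===== LEMMAS AND PROOFS =====

-- the neighbour list, as a plain list; membership-equal to nbrsB
def nbrsL (n x : Int) : List Int :=
  [x + 1, x - 1] ++ (if x = n then [1] else []) ++ (if x = 1 then [n] else [])

theorem mem_nbrsL {n x y : Int} :
    y ∈ nbrsL n x ↔ y = x + 1 ∨ y = x - 1 ∨ (x = n ∧ y = 1) ∨ (x = 1 ∧ y = n) := by
  unfold nbrsL
  split_ifs <;> simp_all

theorem mem_nbrsB {n x y : Int} : y ∈ nbrsB n x ↔ y ∈ nbrsL n x := by
  rw [mem_nbrsL]; unfold nbrsB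
  split_ifs <;> simp_all [PySem.Set.mem_add, PySem.Set.mem_ofList] <;> tauto

theorem nbrsL_symm {n x y : Int} : y ∈ nbrsL n x ↔ x ∈ nbrsL n y := by
  rw [mem_nbrsL, mem_nbrsL]; omega

-- one saturation step on a set of values: add all neighbours of reached middle-elements
def Fstep (n : Int) (middle : List Int) (S : List Int) : List Int :=
  S ++ (middle.filter (fun y => S.contains y)).flatMap (nbrsL n)

theorem mem_Fstep {n : Int} {middle S : List Int} {x : Int} :
    x ∈ Fstep n middle S ↔ x ∈ S ∨ ∃ y ∈ middle, y ∈ S ∧ x ∈ nbrsL n y := by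
  simp [Fstep, List.mem_filter]
  tauto

theorem Fstep_mono {n : Int} {middle S T : List Int}
    (h : ∀ x, x ∈ S → x ∈ T) : ∀ x, x ∈ Fstep n middle S → x ∈ Fstep n middle T := by
  intro x hx
  rw [mem_Fstep] at hx ⊢
  rcases hx with hx | ⟨y, hy, hyS, hxy⟩
  · exact Or.inl (h x hx)
  · exact Or.inr ⟨y, hy, h y hyS, hxy⟩

theorem subset_Fstep {n : Int} {middle S : List Int} : ∀ x, x ∈ S → x ∈ Fstep n middle S := by
  intro x hx; rw [mem_Fstep]; exact Or.inl hx

theorem subset_iterate_Fstep {n : Int} {middle S : List Int} {j k : ℕ} (h : j ≤ k) :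
    ∀ x, x ∈ (Fstep n middle)^[j] S → x ∈ (Fstep n middle)^[k] S := by
  induction k with
  | zero =>
    obtain rfl : j = 0 := by omega
    exact fun x hx => hx
  | succ k ih =>
    intro x hx
    rcases Nat.lt_or_ge j (k+1) with hlt | hge
    · rw [Function.iterate_succ_apply']
      exact subset_Fstep x (ih (by omega) x hx)
    · obtain rfl : j = k + 1 := by omega
      exact hx

-- the closure: m saturation steps from {a} ∪ nbrs(a)
def Clo (n : Int) (middle : List Int) (a : Int) : List Int :=
  (Fstep n middle)^[middle.length] (a :: nbrsL n a)

-- one-step propagation of middle-stability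
theorem middle_stab_step {n : Int} {middle S : List Int} {j : ℕ}
    (hstep : ∀ x ∈ middle, x ∈ (Fstep n middle)^[j+1] S → x ∈ (Fstep n middle)^[j] S) :
    ∀ x ∈ middle, x ∈ (Fstep n middle)^[j+2] S → x ∈ (Fstep n middle)^[j+1] S := by
  intro x hxm hx
  rw [Function.iterate_succ_apply', mem_Fstep] at hx
  rcases hx with hx | ⟨y, hy, hyS, hxy⟩
  · exact hx
  · rw [Function.iterate_succ_apply']
    exact mem_Fstep.mpr (Or.inr ⟨y, hy, hstep y hy hyS, hxy⟩)

theorem middle_stab_ge {n : Int} {middle S : List Int} {j k : ℕ} (hjk : j ≤ k)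
    (hstep : ∀ x ∈ middle, x ∈ (Fstep n middle)^[j+1] S → x ∈ (Fstep n middle)^[j] S) :
    ∀ x ∈ middle, x ∈ (Fstep n middle)^[k+1] S → x ∈ (Fstep n middle)^[k] S := by
  induction k with
  | zero =>
    obtain rfl : j = 0 := by omega
    exact hstep
  | succ k ih =>
    rcases Nat.lt_or_ge j (k+1) with hlt | hge
    · exact middle_stab_step (ih (by omega))
    · obtain rfl : j = k + 1 := by omega
      exact hstep

-- pigeonhole: within m steps the middle-part of the iteration stabilises
theorem exists_stab {n a : Int} {rest : List Int} :
    ∃ j < (a :: rest).length, ∀ x ∈ (a :: rest),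
      x ∈ (Fstep n (a :: rest))^[j+1] (a :: nbrsL n a) →
      x ∈ (Fstep n (a :: rest))^[j] (a :: nbrsL n a) := by
  by_contra hcon
  simp only [not_exists, not_and, not_forall] at hcon
  have hwit : ∀ j < (a :: rest).length, ∃ x ∈ (a :: rest),
      x ∈ (Fstep n (a :: rest))^[j+1] (a :: nbrsL n a) ∧
      x ∉ (Fstep n (a :: rest))^[j] (a :: nbrsL n a) := by
    intro j hj
    obtain ⟨x, hx⟩ := hcon j hj
    obtain ⟨hxm, hx1, hx0⟩ := hx
    exact ⟨x, hxm, hx1, hx0⟩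
  set m := (a :: rest).length with hm
  set g : ℕ → Finset Int :=
    (fun k => (a :: rest).toFinset.filter (fun x => x ∈ (Fstep n (a :: rest))^[k] (a :: nbrsL n a)))
    with hg
  have hmono : ∀ k : ℕ, g k ⊆ g (k + 1) := by
    intro k x hx
    rw [hg, Finset.mem_filter] at hx ⊢
    exact ⟨hx.1, subset_iterate_Fstep (Nat.le_succ k) x hx.2⟩
  have hcard : ∀ j : ℕ, j ≤ m → j + 1 ≤ (g j).card := by
    intro j hj
    induction j with
    | zero =>
      have ha : a ∈ g 0 := by
        rw [hg, Finset.mem_filter]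
        exact ⟨by simp, List.mem_cons_self⟩
      have := Finset.card_pos.mpr ⟨a, ha⟩
      omega
    | succ j ih =>
      obtain ⟨x, hxm, hx1, hx0⟩ := hwit j (by omega)
      have hxg : x ∈ g (j + 1) := by
        rw [hg, Finset.mem_filter]
        exact ⟨List.mem_toFinset.mpr hxm, hx1⟩
      have hxng : x ∉ g j := by
        rw [hg, Finset.mem_filter]
        intro hc
        exact hx0 hc.2
      have hssub : g j ⊂ g (j + 1) := ⟨hmono j, fun hsub => hxng (hsub hxg)⟩
      have := Finset.card_lt_card hssub
      have := ih (by omega)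
      omega
  have h1 : m + 1 ≤ (g m).card := hcard m le_rfl
  have h2 : (g m).card ≤ (a :: rest).toFinset.card := Finset.card_filter_le _ _
  have h3 : (a :: rest).toFinset.card ≤ m := hm ▸ (a :: rest).toFinset_card_le
  omega

-- stabilisation: after m steps the closure is closed for middle-elements
theorem Clo_closed {n a : Int} {rest : List Int} :
    ∀ x ∈ (a :: rest), x ∈ Fstep n (a :: rest) (Clo n (a :: rest) a) → x ∈ Clo n (a :: rest) a := by
  obtain ⟨j, hj, hstep⟩ := exists_stab (n := n) (a := a) (rest := rest)
  intro x hxm hx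
  apply middle_stab_ge (Nat.le_of_lt hj) hstep x hxm
  rw [Function.iterate_succ_apply']
  exact hx

-- ---- A-side ----
theorem mem_nearStep_mono {n : Int} {near : List Int} {y x : Int}
    (hx : x ∈ near) : x ∈ nearStep n near y := by
  unfold nearStep
  split_ifs <;> simp_all

theorem foldl_nearStep_mono {n : Int} {l near : List Int} {x : Int}
    (hx : x ∈ near) : x ∈ l.foldl (nearStep n) near := by
  induction l generalizing near with
  | nil => exact hx
  | cons z l ih => exact ih (mem_nearStep_mono hx)

theorem nbrs_subset_nearStep {n : Int} {near : List Int} {y x : Int}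
    (hy : y ∈ near) (hx : x ∈ nbrsL n y) : x ∈ nearStep n near y := by
  unfold nearStep
  rw [mem_nbrsL] at hx
  have : near.contains y = true := by simp [hy]
  simp only [this, if_true]
  split_ifs <;> simp_all

theorem foldl_nearStep_covers {n : Int} {l near : List Int} {y x : Int}
    (hyl : y ∈ l) (hy : y ∈ near) (hx : x ∈ nbrsL n y) :
    x ∈ l.foldl (nearStep n) near := by
  induction l generalizing near with
  | nil => simp at hyl
  | cons z l ih =>
    simp only [List.foldl_cons]
    rcases List.mem_cons.mp hyl with rfl | hyl'
    · exact foldl_nearStep_mono (nbrs_subset_nearStep hy hx)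
    · exact ih hyl' (mem_nearStep_mono hy)

theorem pass_covers {n : Int} {middle near : List Int} {x : Int}
    (hx : x ∈ Fstep n middle near) : x ∈ middle.foldl (nearStep n) near := by
  rw [mem_Fstep] at hx
  rcases hx with hx | ⟨y, hy, hyS, hxy⟩
  · exact foldl_nearStep_mono hx
  · exact foldl_nearStep_covers hy hyS hxy

theorem foldl_range_const {α : Type} (f : α → α) (s : α) (k : ℕ) :
    (List.range k).foldl (fun b _ => f b) s = f^[k] s := by
  induction k generalizing s with
  | zero => simp
  | succ k ih => rw [List.range_succ, List.foldl_append, ih, Function.iterate_succ_apply']; rfl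

-- invariant: every middle-element of near lies in the closure
theorem nearStep_good {n : Int} {middle near : List Int} {y : Int} {a : Int} {rest : List Int}
    (hmid : middle = a :: rest) (hy : y ∈ middle)
    (good : ∀ x ∈ middle, x ∈ near → x ∈ Clo n middle a) :
    ∀ x ∈ middle, x ∈ nearStep n near y → x ∈ Clo n middle a := by
  subst hmid
  intro x hxm hx
  unfold nearStep at hx
  split_ifs at hx with hc h1 h2
  case _ | _ | _ | _ =>
    have hyn : y ∈ near := by simpa using hc
    have hmem : x ∈ near ∨ x ∈ nbrsL n y := by
      rw [mem_nbrsL]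
      simp only [List.mem_append, List.mem_cons, List.not_mem_nil, or_false] at hx
      tauto
    rcases hmem with hnear | hnb
    · exact good x hxm hnear
    · exact Clo_closed x hxm (mem_Fstep.mpr (Or.inr ⟨y, hy, good y hy hyn, hnb⟩))
  case _ => exact good x hxm hx

theorem foldl_nearStep_good {n : Int} {l middle near : List Int} {a : Int} {rest : List Int}
    (hmid : middle = a :: rest) (hl : ∀ y ∈ l, y ∈ middle)
    (good : ∀ x ∈ middle, x ∈ near → x ∈ Clo n middle a) :
    ∀ x ∈ middle, x ∈ l.foldl (nearStep n) near → x ∈ Clo n middle a := by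
  induction l generalizing near with
  | nil => exact good
  | cons z l ih =>
    exact ih (fun y hy => hl y (List.mem_cons_of_mem _ hy))
      (nearStep_good hmid (hl z List.mem_cons_self) good)

-- ---- B-side ----
theorem bfsB_mono {n : Int} {elems seen : PySem.Set Int} :
    ∀ x ∈ seen, x ∈ bfsB n elems seen := by
  induction seen using bfsB.induct (n := n) (elems := elems) with
  | case1 seen h =>
    rw [bfsB, dif_pos h]
    exact fun x hx => hx
  | case2 seen h ih =>
    rw [bfsB, dif_neg h]
    intro x hx
    exact ih x ((PySem.Set.mem_union _ _ _).mpr (Or.inl hx))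

theorem bfsB_closed {n : Int} {elems seen : PySem.Set Int} :
    ∀ x ∈ elems, (∃ y ∈ bfsB n elems seen, y ∈ nbrsB n x) → x ∈ bfsB n elems seen := by
  induction seen using bfsB.induct (n := n) (elems := elems) with
  | case1 seen h =>
    rw [bfsB, dif_pos h]
    intro x hx ⟨y, hyr, hyn⟩
    have hpred := List.filter_eq_nil_iff.mp h x hx
    by_contra hxs
    apply hpred
    have h1 : (!(PySem.Set.contains seen x)) = true := by
      simp only [Bool.not_eq_true']
      rw [← Bool.not_eq_true, PySem.Set.contains_iff]
      exact hxs
    have h2 : (!(PySem.Set.isdisjoint seen (nbrsB n x))) = true := by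
      simp only [Bool.not_eq_true']
      rw [← Bool.not_eq_true, PySem.Set.isdisjoint_iff]
      intro hdisj
      exact hdisj y hyr hyn
    rw [h1, h2]
    rfl
  | case2 seen h ih =>
    rw [bfsB, dif_neg h]
    exact ih

theorem bfsB_sound {n : Int} {elems seen C : List Int}
    (hstep : ∀ x ∈ elems, (∃ y, y ∈ elems ∧ y ∈ C ∧ y ∈ nbrsB n x) → x ∈ C)
    (hseen : ∀ x ∈ seen, x ∈ elems ∧ x ∈ C) :
    ∀ x ∈ bfsB n elems seen, x ∈ elems ∧ x ∈ C := by
  induction seen using bfsB.induct (n := n) (elems := elems) with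
  | case1 seen h =>
    rw [bfsB, dif_pos h]
    exact hseen
  | case2 seen h ih =>
    rw [bfsB, dif_neg h]
    refine ih ?_
    intro x hx
    rcases (PySem.Set.mem_union _ _ _).mp hx with hx | hx
    · exact hseen x hx
    · obtain ⟨hxe, hxp⟩ := List.mem_filter.mp hx
      refine ⟨hxe, ?_⟩
      have h2 : ((!(PySem.Set.contains seen x)) &&
          (!(PySem.Set.isdisjoint seen (nbrsB n x)))) = true := hxp
      have hdis := (Bool.and_eq_true _ _ |>.mp h2).2
      simp only [Bool.not_eq_true'] at hdis
      have : ¬ (∀ y ∈ seen, y ∉ nbrsB n x) := by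
        intro hd
        rw [← PySem.Set.isdisjoint_iff] at hd
        simp [hd] at hdis
      simp only [not_forall, not_not] at this
      obtain ⟨y, hys, hyn⟩ := this
      obtain ⟨hye, hyC⟩ := hseen y hys
      exact hstep x hxe ⟨y, hye, hyC, hyn⟩


-- ---- assembling both sides ----
theorem N0_subset_Clo {n a : Int} {rest : List Int} :
    ∀ x, x ∈ (a :: nbrsL n a) → x ∈ Clo n (a :: rest) a := by
  intro x hx
  exact subset_iterate_Fstep (Nat.zero_le _) x (by simpa using hx)

theorem passes_good {n a : Int} {rest S : List Int} (k : ℕ)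
    (hgood : ∀ x ∈ (a :: rest), x ∈ S → x ∈ Clo n (a :: rest) a) :
    ∀ x ∈ (a :: rest),
      x ∈ (fun nr => (a :: rest).foldl (nearStep n) nr)^[k] S →
      x ∈ Clo n (a :: rest) a := by
  induction k with
  | zero => simpa using hgood
  | succ k ih =>
    intro x hxm hx
    rw [Function.iterate_succ_apply'] at hx
    exact foldl_nearStep_good rfl (fun y hy => hy) ih x hxm hx

theorem passes_lower {n a : Int} {rest S : List Int} (k : ℕ)
    (hb : ∀ x, x ∈ (a :: nbrsL n a) → x ∈ S) :
    ∀ x, x ∈ (Fstep n (a :: rest))^[k] (a :: nbrsL n a) →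
      x ∈ (fun nr => (a :: rest).foldl (nearStep n) nr)^[k] S := by
  induction k with
  | zero => simpa using hb
  | succ k ih =>
    intro x hx
    rw [Function.iterate_succ_apply'] at hx ⊢
    exact pass_covers (Fstep_mono ih x hx)

theorem near2_iff {n a x : Int} :
    x ∈ (if a = 1 then
           (if a = n then [a, a - 1, a + 1] ++ [1] else [a, a - 1, a + 1]) ++ [n]
         else (if a = n then [a, a - 1, a + 1] ++ [1] else [a, a - 1, a + 1])) ↔
      x ∈ (a :: nbrsL n a) := by
  rw [List.mem_cons, mem_nbrsL]
  split_ifs with h1 h2 h3 <;> simp <;> omega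

theorem A_iff {n a : Int} {rest : List Int} :
    CheckIfNeighbouring n (a :: rest) = true ↔
      ∀ x ∈ (a :: rest), x ∈ Clo n (a :: rest) a := by
  rw [show CheckIfNeighbouring n (a :: rest) =
      ((a :: rest).all (fun entry =>
        (((List.range (a :: rest).length).foldl
          (fun nr _ => (a :: rest).foldl (nearStep n) nr)
          (if a = 1 then
             (if a = n then [a, a - 1, a + 1] ++ [1] else [a, a - 1, a + 1]) ++ [n]
           else (if a = n then [a, a - 1, a + 1] ++ [1] else [a, a - 1, a + 1]))).contains entry))) from rfl]
  rw [foldl_range_const]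
  rw [List.all_eq_true]
  constructor
  · intro h x hxm
    have hx := h x hxm
    rw [List.contains_iff_mem] at hx
    exact passes_good _ (fun x hxm hx => N0_subset_Clo x (near2_iff.mp hx)) x hxm hx
  · intro h x hxm
    rw [List.contains_iff_mem]
    exact passes_lower _ (fun x hx => near2_iff.mpr hx) x (h x hxm)

theorem bfs_complete {n a : Int} {rest : List Int} (k : ℕ) :
    ∀ x ∈ (a :: rest), x ∈ (Fstep n (a :: rest))^[k] (a :: nbrsL n a) →
      x ∈ bfsB n (PySem.Set.ofList (a :: rest)) (PySem.Set.ofList [a]) := by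
  have ha_r : a ∈ bfsB n (PySem.Set.ofList (a :: rest)) (PySem.Set.ofList [a]) :=
    bfsB_mono a ((PySem.Set.mem_ofList _ _).mpr List.mem_cons_self)
  induction k with
  | zero =>
    intro x hxm hx
    simp only [Function.iterate_zero_apply] at hx
    rcases List.mem_cons.mp hx with rfl | hx
    · exact ha_r
    · exact bfsB_closed x ((PySem.Set.mem_ofList _ _).mpr hxm)
        ⟨a, ha_r, (mem_nbrsB).mpr (nbrsL_symm.mpr hx)⟩
  | succ k ih =>
    intro x hxm hx
    rw [Function.iterate_succ_apply', mem_Fstep] at hx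
    rcases hx with hx | ⟨y, hy, hyk, hxy⟩
    · exact ih x hxm hx
    · exact bfsB_closed x ((PySem.Set.mem_ofList _ _).mpr hxm)
        ⟨y, ih y hy hyk, (mem_nbrsB).mpr (nbrsL_symm.mpr hxy)⟩

theorem B_iff {n a : Int} {rest : List Int} :
    CheckIfNeighbouring_alt n (a :: rest) = true ↔
      ∀ x ∈ (a :: rest), x ∈ Clo n (a :: rest) a := by
  rw [show CheckIfNeighbouring_alt n (a :: rest) =
      PySem.Set.issubset (PySem.Set.ofList (a :: rest))
        (bfsB n (PySem.Set.ofList (a :: rest)) (PySem.Set.ofList [a])) from rfl]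
  rw [PySem.Set.issubset_iff]
  have helems : ∀ x : Int, x ∈ PySem.Set.ofList (a :: rest) ↔ x ∈ (a :: rest) :=
    fun x => PySem.Set.mem_ofList _ _
  have hsound := bfsB_sound (n := n) (elems := PySem.Set.ofList (a :: rest))
      (seen := PySem.Set.ofList [a]) (C := Clo n (a :: rest) a)
    (by
      intro x hxe hex
      obtain ⟨y, hye, hyC, hynb⟩ := hex
      apply Clo_closed x ((helems x).mp hxe)
      exact mem_Fstep.mpr (Or.inr ⟨y, (helems y).mp hye,
        hyC, nbrsL_symm.mp ((mem_nbrsB).mp hynb)⟩))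
    (by
      intro x hx
      have : x = a := by
        have := (PySem.Set.mem_ofList _ _).mp hx
        simpa using this
      subst this
      exact ⟨(helems x).mpr List.mem_cons_self,
        N0_subset_Clo x List.mem_cons_self⟩)
  constructor
  · intro h x hxm
    exact (hsound x (h x ((helems x).mpr hxm))).2
  · intro h x hxe
    have hxm := (helems x).mp hxe
    exact bfs_complete (a :: rest).length x hxm (h x hxm)

-- ===== VERDICT (by name: the statement is the Claim_ definition above) =====
theorem CheckIfNeighbouring_spec : Claim_equal_CheckIfNeighbouring := by
  intro n middle hdom hpre
  unfold Spec_CheckIfNeighbouring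
  cases middle with
  | nil => exact absurd rfl hpre
  | cons a rest =>
    have h3 := (A_iff (n := n) (a := a) (rest := rest)).trans
      (B_iff (n := n) (a := a) (rest := rest)).symm
    cases hA : CheckIfNeighbouring n (a :: rest) <;>
      cases hB : CheckIfNeighbouring_alt n (a :: rest) <;> simp_all
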